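-- pv_equiv track=rewrite | github.com/VUzan-bio/GlycoML | phase2_data_downloader.py | normalize_iupac
-- ===== SOURCE A (Python) =====
-- def normalize_iupac(iupac: str) -> str:
--     if not iupac:
--         return ""
--     replacements = {
--         "Glucose": "Glc",
--         "Galactose": "Gal",
--         "Mannose": "Man",
--         "N-acetylglucosamine": "GlcNAc",
--         "N-acetylgalactosamine": "GalNAc",
--     }
--     normalized = iupac
--     for key, value in replacements.items():
--         normalized = normalized.replace(key, value)
--     return normalized
-- ===== SOURCE B (Python) =====
-- def normalize_iupac(iupac: str) -> str:
--     replacements = [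
--         ("Glucose", "Glc"),
--         ("Galactose", "Gal"),
--         ("Mannose", "Man"),
--         ("N-acetylglucosamine", "GlcNAc"),
--         ("N-acetylgalactosamine", "GalNAc"),
--     ]
--     out = []
--     i = 0
--     n = len(iupac)
--     while i < n:
--         for key, value in replacements:
--             if iupac.startswith(key, i):
--                 out.append(value)
--                 i += len(key)
--                 break
--         else:
--             out.append(iupac[i])
--             i += 1
--     return "".join(out)
-- ===== Notes on version B (the rewrite author's own statement) =====
-- stated objective: alternative
-- what changed: A runs five sequential str.replace passes, each rescanning the whole (intermediate) string; B makes a single left-to-right pass that at each position tries the five keys and emits either an abbreviation or the current character, building the output once.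
import Mathlib
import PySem

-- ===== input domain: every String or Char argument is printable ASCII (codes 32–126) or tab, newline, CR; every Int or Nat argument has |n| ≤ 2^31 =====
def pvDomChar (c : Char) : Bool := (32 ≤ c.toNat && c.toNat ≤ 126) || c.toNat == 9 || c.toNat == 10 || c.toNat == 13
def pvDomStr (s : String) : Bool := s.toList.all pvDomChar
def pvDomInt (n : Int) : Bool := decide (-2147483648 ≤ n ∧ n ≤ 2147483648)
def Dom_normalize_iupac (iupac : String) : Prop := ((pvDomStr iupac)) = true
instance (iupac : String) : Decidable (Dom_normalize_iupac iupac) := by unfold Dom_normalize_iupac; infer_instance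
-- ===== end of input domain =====

set_option maxRecDepth 4096


-- B replaces A's five sequential full-string replace passes by one single left-to-right
-- scan that matches the five keys at each position; same return value, no side effects.

-- ===== PORT A =====
def normalize_iupac (iupac : String) : String :=
  if iupac.isEmpty then "" else
    let replacements : List (String × String) :=
      [("Glucose", "Glc"), ("Galactose", "Gal"), ("Mannose", "Man"),
       ("N-acetylglucosamine", "GlcNAc"), ("N-acetylgalactosamine", "GalNAc")]
    replacements.foldl (fun normalized kv => PySem.Str.replace normalized kv.1 kv.2) iupac

-- ===== PORT B =====
-- the while-loop of Source B: at each position try the five keys in order (startswith at i),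
-- emit the abbreviation and skip the key, or emit the character and advance by one
def nrmScan : List Char → List Char
  | [] => []
  | c :: t =>
    if List.isPrefixOf "Glucose".toList (c :: t) then "Glc".toList ++ nrmScan (t.drop 6)
    else if List.isPrefixOf "Galactose".toList (c :: t) then "Gal".toList ++ nrmScan (t.drop 8)
    else if List.isPrefixOf "Mannose".toList (c :: t) then "Man".toList ++ nrmScan (t.drop 6)
    else if List.isPrefixOf "N-acetylglucosamine".toList (c :: t) then "GlcNAc".toList ++ nrmScan (t.drop 18)
    else if List.isPrefixOf "N-acetylgalactosamine".toList (c :: t) then "GalNAc".toList ++ nrmScan (t.drop 20)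
    else c :: nrmScan t
termination_by l => l.length
decreasing_by all_goals (simp; try omega)

def normalize_iupac_alt (iupac : String) : String :=
  String.ofList (nrmScan iupac.toList)

-- ===== PRECONDITION & SPEC =====
def Spec_normalize_iupac (iupac : String) (out : String) : Prop := out = normalize_iupac_alt iupac
instance (iupac : String) (out : String) : Decidable (Spec_normalize_iupac iupac out) := by unfold Spec_normalize_iupac; infer_instance

-- ===== CLAIM (what is proved, stated in full; the proofs are below) =====
def Claim_equal_normalize_iupac : Prop := ∀ (iupac : String), Dom_normalize_iupac iupac → Spec_normalize_iupac iupac (normalize_iupac iupac)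

-- ===== LEMMAS AND PROOFS =====

-- clean structural version of Python str.replace (nonempty pattern)
def rep (k v : List Char) : List Char → List Char
  | [] => []
  | c :: t =>
    if List.isPrefixOf k (c :: t) then v ++ rep k v (t.drop (k.length - 1))
    else c :: rep k v t
termination_by l => l.length
decreasing_by all_goals (simp; try omega)

theorem rep_go (k v : List Char) (hk : k ≠ []) :
    ∀ (fuel : Nat) (l acc : List Char), l.length ≤ fuel →
      PySem.Chars.replace.go k v fuel l acc = acc.reverse ++ rep k v l := by
  intro fuel
  induction fuel with
  | zero =>
    intro l acc hl
    have hnil : l = [] := List.eq_nil_of_length_eq_zero (Nat.le_zero.mp hl)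
    subst hnil
    rw [PySem.Chars.replace.go.eq_def]
    simp [rep]
  | succ n ih =>
    intro l acc hl
    cases l with
    | nil =>
      rw [PySem.Chars.replace.go.eq_def]
      simp [rep]
    | cons c t =>
      rw [PySem.Chars.replace.go.eq_def]
      simp only []
      by_cases hp : List.isPrefixOf k (c :: t) = true
      · rw [if_pos hp]
        obtain ⟨kh, k', rfl⟩ : ∃ kh k', k = kh :: k' := by
          cases k with
          | nil => exact absurd rfl hk
          | cons a b => exact ⟨a, b, rfl⟩
        have hdrop : List.drop (kh :: k').length (c :: t) = t.drop ((kh :: k').length - 1) := by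
          simp
        rw [hdrop, ih _ _ (by
          have := List.length_drop (l := t) (i := (kh :: k').length - 1)
          simp at hl ⊢
          omega)]
        rw [rep, if_pos hp]
        simp
      · rw [if_neg hp]
        rw [ih _ _ (by simp at hl ⊢; omega)]
        rw [rep, if_neg hp]
        simp

theorem replace_eq_rep (s k v : List Char) (hk : k ≠ []) :
    PySem.Chars.replace s k v = rep k v s := by
  unfold PySem.Chars.replace
  rw [if_neg (by simp [hk]), rep_go k v hk s.length s [] le_rfl]
  simp

-- pass-through when the key's first character never occurs in the prefix
theorem rep_pass_of_all_ne (kh : Char) (k' v : List Char) :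
    ∀ (p x : List Char), (∀ c ∈ p, kh ≠ c) →
      rep (kh :: k') v (p ++ x) = p ++ rep (kh :: k') v x := by
  intro p
  induction p with
  | nil => intro x _; rfl
  | cons d p' ih =>
    intro x h
    have hne : ¬ List.isPrefixOf (kh :: k') (d :: (p' ++ x)) = true := by
      simp [List.isPrefixOf]
      intro hkd
      exact absurd hkd (h d (by simp))
    rw [List.cons_append, rep, if_neg hne, ih x (fun c hc => h c (by simp [hc]))]
    simp

-- matching at the front
theorem rep_self (kh : Char) (k' v x : List Char) :
    rep (kh :: k') v (kh :: (k' ++ x)) = v ++ rep (kh :: k') v x := by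
  rw [rep, if_pos (by simp [List.isPrefixOf_iff_prefix])]
  simp

-- a replace with key and value both starting with a character absent from w
-- cannot create a new w-prefix
theorem rep_prefix_back (kh vh : Char) (k' v' : List Char) :
    ∀ (t w : List Char), kh ∉ w → vh ∉ w →
      List.isPrefixOf w (rep (kh :: k') (vh :: v') t) = true →
      List.isPrefixOf w t = true := by
  intro t
  induction t with
  | nil => intro w _ _ h; simpa [rep] using h
  | cons c t' ih =>
    intro w hkh hvh h
    cases w with
    | nil => simp [List.isPrefixOf]
    | cons a w' =>
      rw [rep] at h
      by_cases hp : List.isPrefixOf (kh :: k') (c :: t') = true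
      · rw [if_pos hp] at h
        simp only [List.cons_append, List.isPrefixOf, Bool.and_eq_true, beq_iff_eq] at h
        exact absurd h.1.symm ((by simpa using hvh : ¬ vh = a ∧ vh ∉ w').1)
      · rw [if_neg hp] at h
        simp only [List.isPrefixOf, Bool.and_eq_true, beq_iff_eq] at h ⊢
        exact ⟨h.1, ih w' ((by simpa using hkh : ¬ kh = a ∧ kh ∉ w').2)
          ((by simpa using hvh : ¬ vh = a ∧ vh ∉ w').2) h.2⟩

theorem tl_Gal : "Gal".toList = ['G','a','l'] := rfl

theorem tl_GalNAc : "GalNAc".toList = ['G','a','l','N','A','c'] := rfl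

theorem tl_Galactose : "Galactose".toList = ['G','a','l','a','c','t','o','s','e'] := rfl

theorem tl_Glc : "Glc".toList = ['G','l','c'] := rfl

theorem tl_GlcNAc : "GlcNAc".toList = ['G','l','c','N','A','c'] := rfl

theorem tl_Glucose : "Glucose".toList = ['G','l','u','c','o','s','e'] := rfl

theorem tl_Man : "Man".toList = ['M','a','n'] := rfl

theorem tl_Mannose : "Mannose".toList = ['M','a','n','n','o','s','e'] := rfl

theorem tl_N_acetylgalactosamine : "N-acetylgalactosamine".toList = ['N','-','a','c','e','t','y','l','g','a','l','a','c','t','o','s','a','m','i','n','e'] := rfl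

theorem tl_N_acetylglucosamine : "N-acetylglucosamine".toList = ['N','-','a','c','e','t','y','l','g','l','u','c','o','s','a','m','i','n','e'] := rfl

theorem m1 (x : List Char) : rep "Glucose".toList "Glc".toList ("Glucose".toList ++ x) = "Glc".toList ++ rep "Glucose".toList "Glc".toList x := by
  simp only [tl_Glucose, tl_Glc]
  exact rep_self 'G' ['l','u','c','o','s','e'] ['G','l','c'] x

theorem m2 (x : List Char) : rep "Galactose".toList "Gal".toList ("Galactose".toList ++ x) = "Gal".toList ++ rep "Galactose".toList "Gal".toList x := by
  simp only [tl_Galactose, tl_Gal]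
  exact rep_self 'G' ['a','l','a','c','t','o','s','e'] ['G','a','l'] x

theorem m3 (x : List Char) : rep "Mannose".toList "Man".toList ("Mannose".toList ++ x) = "Man".toList ++ rep "Mannose".toList "Man".toList x := by
  simp only [tl_Mannose, tl_Man]
  exact rep_self 'M' ['a','n','n','o','s','e'] ['M','a','n'] x

theorem m4 (x : List Char) : rep "N-acetylglucosamine".toList "GlcNAc".toList ("N-acetylglucosamine".toList ++ x) = "GlcNAc".toList ++ rep "N-acetylglucosamine".toList "GlcNAc".toList x := by
  simp only [tl_N_acetylglucosamine, tl_GlcNAc]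
  exact rep_self 'N' ['-','a','c','e','t','y','l','g','l','u','c','o','s','a','m','i','n','e'] ['G','l','c','N','A','c'] x

theorem m5 (x : List Char) : rep "N-acetylgalactosamine".toList "GalNAc".toList ("N-acetylgalactosamine".toList ++ x) = "GalNAc".toList ++ rep "N-acetylgalactosamine".toList "GalNAc".toList x := by
  simp only [tl_N_acetylgalactosamine, tl_GalNAc]
  exact rep_self 'N' ['-','a','c','e','t','y','l','g','a','l','a','c','t','o','s','a','m','i','n','e'] ['G','a','l','N','A','c'] x

theorem p2_Glc (x : List Char) : rep "Galactose".toList "Gal".toList ("Glc".toList ++ x) = "Glc".toList ++ rep "Galactose".toList "Gal".toList x := by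
  simp only [tl_Galactose, tl_Gal, tl_Glc]
  rw [show (['G','l','c'] ++ x) = 'G'::'l'::'c'::x from rfl]
  rw [rep, if_neg (by simp [List.isPrefixOf]), rep, if_neg (by simp [List.isPrefixOf]), rep, if_neg (by simp [List.isPrefixOf])]
  rfl

theorem p3_Glc (x : List Char) : rep "Mannose".toList "Man".toList ("Glc".toList ++ x) = "Glc".toList ++ rep "Mannose".toList "Man".toList x := by
  simp only [tl_Mannose, tl_Man, tl_Glc]
  exact rep_pass_of_all_ne 'M' ['a','n','n','o','s','e'] ['M','a','n'] ['G','l','c'] x (by simp)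

theorem p4_Glc (x : List Char) : rep "N-acetylglucosamine".toList "GlcNAc".toList ("Glc".toList ++ x) = "Glc".toList ++ rep "N-acetylglucosamine".toList "GlcNAc".toList x := by
  simp only [tl_N_acetylglucosamine, tl_GlcNAc, tl_Glc]
  exact rep_pass_of_all_ne 'N' ['-','a','c','e','t','y','l','g','l','u','c','o','s','a','m','i','n','e'] ['G','l','c','N','A','c'] ['G','l','c'] x (by simp)

theorem p5_Glc (x : List Char) : rep "N-acetylgalactosamine".toList "GalNAc".toList ("Glc".toList ++ x) = "Glc".toList ++ rep "N-acetylgalactosamine".toList "GalNAc".toList x := by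
  simp only [tl_N_acetylgalactosamine, tl_GalNAc, tl_Glc]
  exact rep_pass_of_all_ne 'N' ['-','a','c','e','t','y','l','g','a','l','a','c','t','o','s','a','m','i','n','e'] ['G','a','l','N','A','c'] ['G','l','c'] x (by simp)

theorem p1_Galactose (x : List Char) : rep "Glucose".toList "Glc".toList ("Galactose".toList ++ x) = "Galactose".toList ++ rep "Glucose".toList "Glc".toList x := by
  simp only [tl_Glucose, tl_Glc, tl_Galactose]
  rw [show (['G','a','l','a','c','t','o','s','e'] ++ x) = 'G'::'a'::'l'::'a'::'c'::'t'::'o'::'s'::'e'::x from rfl]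
  rw [rep, if_neg (by simp [List.isPrefixOf]), rep, if_neg (by simp [List.isPrefixOf]), rep, if_neg (by simp [List.isPrefixOf]), rep, if_neg (by simp [List.isPrefixOf]), rep, if_neg (by simp [List.isPrefixOf]), rep, if_neg (by simp [List.isPrefixOf]), rep, if_neg (by simp [List.isPrefixOf]), rep, if_neg (by simp [List.isPrefixOf]), rep, if_neg (by simp [List.isPrefixOf])]
  rfl

theorem p3_Gal (x : List Char) : rep "Mannose".toList "Man".toList ("Gal".toList ++ x) = "Gal".toList ++ rep "Mannose".toList "Man".toList x := by
  simp only [tl_Mannose, tl_Man, tl_Gal]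
  exact rep_pass_of_all_ne 'M' ['a','n','n','o','s','e'] ['M','a','n'] ['G','a','l'] x (by simp)

theorem p4_Gal (x : List Char) : rep "N-acetylglucosamine".toList "GlcNAc".toList ("Gal".toList ++ x) = "Gal".toList ++ rep "N-acetylglucosamine".toList "GlcNAc".toList x := by
  simp only [tl_N_acetylglucosamine, tl_GlcNAc, tl_Gal]
  exact rep_pass_of_all_ne 'N' ['-','a','c','e','t','y','l','g','l','u','c','o','s','a','m','i','n','e'] ['G','l','c','N','A','c'] ['G','a','l'] x (by simp)

theorem p5_Gal (x : List Char) : rep "N-acetylgalactosamine".toList "GalNAc".toList ("Gal".toList ++ x) = "Gal".toList ++ rep "N-acetylgalactosamine".toList "GalNAc".toList x := by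
  simp only [tl_N_acetylgalactosamine, tl_GalNAc, tl_Gal]
  exact rep_pass_of_all_ne 'N' ['-','a','c','e','t','y','l','g','a','l','a','c','t','o','s','a','m','i','n','e'] ['G','a','l','N','A','c'] ['G','a','l'] x (by simp)

theorem p1_Mannose (x : List Char) : rep "Glucose".toList "Glc".toList ("Mannose".toList ++ x) = "Mannose".toList ++ rep "Glucose".toList "Glc".toList x := by
  simp only [tl_Glucose, tl_Glc, tl_Mannose]
  exact rep_pass_of_all_ne 'G' ['l','u','c','o','s','e'] ['G','l','c'] ['M','a','n','n','o','s','e'] x (by simp)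

theorem p2_Mannose (x : List Char) : rep "Galactose".toList "Gal".toList ("Mannose".toList ++ x) = "Mannose".toList ++ rep "Galactose".toList "Gal".toList x := by
  simp only [tl_Galactose, tl_Gal, tl_Mannose]
  exact rep_pass_of_all_ne 'G' ['a','l','a','c','t','o','s','e'] ['G','a','l'] ['M','a','n','n','o','s','e'] x (by simp)

theorem p4_Man (x : List Char) : rep "N-acetylglucosamine".toList "GlcNAc".toList ("Man".toList ++ x) = "Man".toList ++ rep "N-acetylglucosamine".toList "GlcNAc".toList x := by
  simp only [tl_N_acetylglucosamine, tl_GlcNAc, tl_Man]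
  exact rep_pass_of_all_ne 'N' ['-','a','c','e','t','y','l','g','l','u','c','o','s','a','m','i','n','e'] ['G','l','c','N','A','c'] ['M','a','n'] x (by simp)

theorem p5_Man (x : List Char) : rep "N-acetylgalactosamine".toList "GalNAc".toList ("Man".toList ++ x) = "Man".toList ++ rep "N-acetylgalactosamine".toList "GalNAc".toList x := by
  simp only [tl_N_acetylgalactosamine, tl_GalNAc, tl_Man]
  exact rep_pass_of_all_ne 'N' ['-','a','c','e','t','y','l','g','a','l','a','c','t','o','s','a','m','i','n','e'] ['G','a','l','N','A','c'] ['M','a','n'] x (by simp)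

theorem p1_N_acetylglucosamine (x : List Char) : rep "Glucose".toList "Glc".toList ("N-acetylglucosamine".toList ++ x) = "N-acetylglucosamine".toList ++ rep "Glucose".toList "Glc".toList x := by
  simp only [tl_Glucose, tl_Glc, tl_N_acetylglucosamine]
  exact rep_pass_of_all_ne 'G' ['l','u','c','o','s','e'] ['G','l','c'] ['N','-','a','c','e','t','y','l','g','l','u','c','o','s','a','m','i','n','e'] x (by simp)

theorem p2_N_acetylglucosamine (x : List Char) : rep "Galactose".toList "Gal".toList ("N-acetylglucosamine".toList ++ x) = "N-acetylglucosamine".toList ++ rep "Galactose".toList "Gal".toList x := by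
  simp only [tl_Galactose, tl_Gal, tl_N_acetylglucosamine]
  exact rep_pass_of_all_ne 'G' ['a','l','a','c','t','o','s','e'] ['G','a','l'] ['N','-','a','c','e','t','y','l','g','l','u','c','o','s','a','m','i','n','e'] x (by simp)

theorem p3_N_acetylglucosamine (x : List Char) : rep "Mannose".toList "Man".toList ("N-acetylglucosamine".toList ++ x) = "N-acetylglucosamine".toList ++ rep "Mannose".toList "Man".toList x := by
  simp only [tl_Mannose, tl_Man, tl_N_acetylglucosamine]
  exact rep_pass_of_all_ne 'M' ['a','n','n','o','s','e'] ['M','a','n'] ['N','-','a','c','e','t','y','l','g','l','u','c','o','s','a','m','i','n','e'] x (by simp)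

theorem p5_GlcNAc (x : List Char) : rep "N-acetylgalactosamine".toList "GalNAc".toList ("GlcNAc".toList ++ x) = "GlcNAc".toList ++ rep "N-acetylgalactosamine".toList "GalNAc".toList x := by
  simp only [tl_N_acetylgalactosamine, tl_GalNAc, tl_GlcNAc]
  rw [show (['G','l','c','N','A','c'] ++ x) = 'G'::'l'::'c'::'N'::'A'::'c'::x from rfl]
  rw [rep, if_neg (by simp [List.isPrefixOf]), rep, if_neg (by simp [List.isPrefixOf]), rep, if_neg (by simp [List.isPrefixOf]), rep, if_neg (by simp [List.isPrefixOf]), rep, if_neg (by simp [List.isPrefixOf]), rep, if_neg (by simp [List.isPrefixOf])]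
  rfl

theorem p1_N_acetylgalactosamine (x : List Char) : rep "Glucose".toList "Glc".toList ("N-acetylgalactosamine".toList ++ x) = "N-acetylgalactosamine".toList ++ rep "Glucose".toList "Glc".toList x := by
  simp only [tl_Glucose, tl_Glc, tl_N_acetylgalactosamine]
  exact rep_pass_of_all_ne 'G' ['l','u','c','o','s','e'] ['G','l','c'] ['N','-','a','c','e','t','y','l','g','a','l','a','c','t','o','s','a','m','i','n','e'] x (by simp)

theorem p2_N_acetylgalactosamine (x : List Char) : rep "Galactose".toList "Gal".toList ("N-acetylgalactosamine".toList ++ x) = "N-acetylgalactosamine".toList ++ rep "Galactose".toList "Gal".toList x := by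
  simp only [tl_Galactose, tl_Gal, tl_N_acetylgalactosamine]
  exact rep_pass_of_all_ne 'G' ['a','l','a','c','t','o','s','e'] ['G','a','l'] ['N','-','a','c','e','t','y','l','g','a','l','a','c','t','o','s','a','m','i','n','e'] x (by simp)

theorem p3_N_acetylgalactosamine (x : List Char) : rep "Mannose".toList "Man".toList ("N-acetylgalactosamine".toList ++ x) = "N-acetylgalactosamine".toList ++ rep "Mannose".toList "Man".toList x := by
  simp only [tl_Mannose, tl_Man, tl_N_acetylgalactosamine]
  exact rep_pass_of_all_ne 'M' ['a','n','n','o','s','e'] ['M','a','n'] ['N','-','a','c','e','t','y','l','g','a','l','a','c','t','o','s','a','m','i','n','e'] x (by simp)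

theorem p4_N_acetylgalactosamine (x : List Char) : rep "N-acetylglucosamine".toList "GlcNAc".toList ("N-acetylgalactosamine".toList ++ x) = "N-acetylgalactosamine".toList ++ rep "N-acetylglucosamine".toList "GlcNAc".toList x := by
  simp only [tl_N_acetylglucosamine, tl_GlcNAc, tl_N_acetylgalactosamine]
  rw [show (['N','-','a','c','e','t','y','l','g','a','l','a','c','t','o','s','a','m','i','n','e'] ++ x) = 'N'::'-'::'a'::'c'::'e'::'t'::'y'::'l'::'g'::'a'::'l'::'a'::'c'::'t'::'o'::'s'::'a'::'m'::'i'::'n'::'e'::x from rfl]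
  rw [rep, if_neg (by simp [List.isPrefixOf]), rep, if_neg (by simp [List.isPrefixOf]), rep, if_neg (by simp [List.isPrefixOf]), rep, if_neg (by simp [List.isPrefixOf]), rep, if_neg (by simp [List.isPrefixOf]), rep, if_neg (by simp [List.isPrefixOf]), rep, if_neg (by simp [List.isPrefixOf]), rep, if_neg (by simp [List.isPrefixOf]), rep, if_neg (by simp [List.isPrefixOf]), rep, if_neg (by simp [List.isPrefixOf]), rep, if_neg (by simp [List.isPrefixOf]), rep, if_neg (by simp [List.isPrefixOf]), rep, if_neg (by simp [List.isPrefixOf]), rep, if_neg (by simp [List.isPrefixOf]), rep, if_neg (by simp [List.isPrefixOf]), rep, if_neg (by simp [List.isPrefixOf]), rep, if_neg (by simp [List.isPrefixOf]), rep, if_neg (by simp [List.isPrefixOf]), rep, if_neg (by simp [List.isPrefixOf]), rep, if_neg (by simp [List.isPrefixOf]), rep, if_neg (by simp [List.isPrefixOf])]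
  rfl

theorem cons_pref_transfer (a c : Char) (w t X : List Char)
    (hback : List.isPrefixOf w X = true → List.isPrefixOf w t = true)
    (h : ¬ List.isPrefixOf (a :: w) (c :: t) = true) :
    ¬ List.isPrefixOf (a :: w) (c :: X) = true := by
  simp only [List.isPrefixOf, Bool.and_eq_true, beq_iff_eq] at h ⊢
  intro hx
  exact h ⟨hx.1, hback hx.2⟩

theorem repAll_eq_scan : ∀ l : List Char,
    rep "N-acetylgalactosamine".toList "GalNAc".toList (rep "N-acetylglucosamine".toList "GlcNAc".toList (rep "Mannose".toList "Man".toList (rep "Galactose".toList "Gal".toList (rep "Glucose".toList "Glc".toList l)))) = nrmScan l := by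
  intro l
  induction l using nrmScan.induct with
  | case1 => simp [rep, nrmScan]
  | case2 c t h1 ih =>
    obtain ⟨m, hm⟩ := List.isPrefixOf_iff_prefix.mp h1
    have hd : t.drop 6 = m := by
      have hx := congrArg (List.drop 7) hm
      simpa [tl_Glucose] using hx.symm
    rw [nrmScan, if_pos h1, hd, ← hm]
    rw [hd] at ih
    rw [m1, p2_Glc, p3_Glc, p4_Glc, p5_Glc, ih]
  | case3 c t h1 h2 ih =>
    obtain ⟨m, hm⟩ := List.isPrefixOf_iff_prefix.mp h2
    have hd : t.drop 8 = m := by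
      have hx := congrArg (List.drop 9) hm
      simpa [tl_Galactose] using hx.symm
    rw [nrmScan, if_neg h1, if_pos h2, hd, ← hm]
    rw [hd] at ih
    rw [p1_Galactose, m2, p3_Gal, p4_Gal, p5_Gal, ih]
  | case4 c t h1 h2 h3 ih =>
    obtain ⟨m, hm⟩ := List.isPrefixOf_iff_prefix.mp h3
    have hd : t.drop 6 = m := by
      have hx := congrArg (List.drop 7) hm
      simpa [tl_Mannose] using hx.symm
    rw [nrmScan, if_neg h1, if_neg h2, if_pos h3, hd, ← hm]
    rw [hd] at ih
    rw [p1_Mannose, p2_Mannose, m3, p4_Man, p5_Man, ih]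
  | case5 c t h1 h2 h3 h4 ih =>
    obtain ⟨m, hm⟩ := List.isPrefixOf_iff_prefix.mp h4
    have hd : t.drop 18 = m := by
      have hx := congrArg (List.drop 19) hm
      simpa [tl_N_acetylglucosamine] using hx.symm
    rw [nrmScan, if_neg h1, if_neg h2, if_neg h3, if_pos h4, hd, ← hm]
    rw [hd] at ih
    rw [p1_N_acetylglucosamine, p2_N_acetylglucosamine, p3_N_acetylglucosamine, m4, p5_GlcNAc, ih]
  | case6 c t h1 h2 h3 h4 h5 ih =>
    obtain ⟨m, hm⟩ := List.isPrefixOf_iff_prefix.mp h5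
    have hd : t.drop 20 = m := by
      have hx := congrArg (List.drop 21) hm
      simpa [tl_N_acetylgalactosamine] using hx.symm
    rw [nrmScan, if_neg h1, if_neg h2, if_neg h3, if_neg h4, if_pos h5, hd, ← hm]
    rw [hd] at ih
    rw [p1_N_acetylgalactosamine, p2_N_acetylgalactosamine, p3_N_acetylgalactosamine, p4_N_acetylgalactosamine, m5, ih]
  | case7 c t h1 h2 h3 h4 h5 ih =>
    rw [nrmScan]
    simp only [tl_Glucose, tl_Galactose, tl_Mannose, tl_N_acetylglucosamine, tl_N_acetylgalactosamine, tl_Glc, tl_Gal, tl_Man, tl_GlcNAc, tl_GalNAc] at h1 h2 h3 h4 h5 ih ⊢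
    rw [if_neg h1, if_neg h2, if_neg h3, if_neg h4, if_neg h5]
    have e1 : rep ['G','l','u','c','o','s','e'] ['G','l','c'] (c :: t) = c :: rep ['G','l','u','c','o','s','e'] ['G','l','c'] t := by rw [rep, if_neg h1]
    have n2 : ¬ List.isPrefixOf ['G','a','l','a','c','t','o','s','e'] (c :: (rep ['G','l','u','c','o','s','e'] ['G','l','c'] t)) = true :=
      cons_pref_transfer 'G' c ['a','l','a','c','t','o','s','e'] t _ (fun hx => rep_prefix_back 'G' 'G' ['l','u','c','o','s','e'] ['l','c'] t ['a','l','a','c','t','o','s','e'] (by simp) (by simp) (hx)) h2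
    have e2 : rep ['G','a','l','a','c','t','o','s','e'] ['G','a','l'] (c :: (rep ['G','l','u','c','o','s','e'] ['G','l','c'] t)) = c :: (rep ['G','a','l','a','c','t','o','s','e'] ['G','a','l'] (rep ['G','l','u','c','o','s','e'] ['G','l','c'] t)) := by rw [rep, if_neg n2]
    have n3 : ¬ List.isPrefixOf ['M','a','n','n','o','s','e'] (c :: (rep ['G','a','l','a','c','t','o','s','e'] ['G','a','l'] (rep ['G','l','u','c','o','s','e'] ['G','l','c'] t))) = true :=
      cons_pref_transfer 'M' c ['a','n','n','o','s','e'] t _ (fun hx => rep_prefix_back 'G' 'G' ['l','u','c','o','s','e'] ['l','c'] t ['a','n','n','o','s','e'] (by simp) (by simp) (rep_prefix_back 'G' 'G' ['a','l','a','c','t','o','s','e'] ['a','l'] (rep ['G','l','u','c','o','s','e'] ['G','l','c'] t) ['a','n','n','o','s','e'] (by simp) (by simp) (hx))) h3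
    have e3 : rep ['M','a','n','n','o','s','e'] ['M','a','n'] (c :: (rep ['G','a','l','a','c','t','o','s','e'] ['G','a','l'] (rep ['G','l','u','c','o','s','e'] ['G','l','c'] t))) = c :: (rep ['M','a','n','n','o','s','e'] ['M','a','n'] (rep ['G','a','l','a','c','t','o','s','e'] ['G','a','l'] (rep ['G','l','u','c','o','s','e'] ['G','l','c'] t))) := by rw [rep, if_neg n3]
    have n4 : ¬ List.isPrefixOf ['N','-','a','c','e','t','y','l','g','l','u','c','o','s','a','m','i','n','e'] (c :: (rep ['M','a','n','n','o','s','e'] ['M','a','n'] (rep ['G','a','l','a','c','t','o','s','e'] ['G','a','l'] (rep ['G','l','u','c','o','s','e'] ['G','l','c'] t)))) = true :=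
      cons_pref_transfer 'N' c ['-','a','c','e','t','y','l','g','l','u','c','o','s','a','m','i','n','e'] t _ (fun hx => rep_prefix_back 'G' 'G' ['l','u','c','o','s','e'] ['l','c'] t ['-','a','c','e','t','y','l','g','l','u','c','o','s','a','m','i','n','e'] (by simp) (by simp) (rep_prefix_back 'G' 'G' ['a','l','a','c','t','o','s','e'] ['a','l'] (rep ['G','l','u','c','o','s','e'] ['G','l','c'] t) ['-','a','c','e','t','y','l','g','l','u','c','o','s','a','m','i','n','e'] (by simp) (by simp) (rep_prefix_back 'M' 'M' ['a','n','n','o','s','e'] ['a','n'] (rep ['G','a','l','a','c','t','o','s','e'] ['G','a','l'] (rep ['G','l','u','c','o','s','e'] ['G','l','c'] t)) ['-','a','c','e','t','y','l','g','l','u','c','o','s','a','m','i','n','e'] (by simp) (by simp) (hx)))) h4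
    have e4 : rep ['N','-','a','c','e','t','y','l','g','l','u','c','o','s','a','m','i','n','e'] ['G','l','c','N','A','c'] (c :: (rep ['M','a','n','n','o','s','e'] ['M','a','n'] (rep ['G','a','l','a','c','t','o','s','e'] ['G','a','l'] (rep ['G','l','u','c','o','s','e'] ['G','l','c'] t)))) = c :: (rep ['N','-','a','c','e','t','y','l','g','l','u','c','o','s','a','m','i','n','e'] ['G','l','c','N','A','c'] (rep ['M','a','n','n','o','s','e'] ['M','a','n'] (rep ['G','a','l','a','c','t','o','s','e'] ['G','a','l'] (rep ['G','l','u','c','o','s','e'] ['G','l','c'] t)))) := by rw [rep, if_neg n4]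
    have n5 : ¬ List.isPrefixOf ['N','-','a','c','e','t','y','l','g','a','l','a','c','t','o','s','a','m','i','n','e'] (c :: (rep ['N','-','a','c','e','t','y','l','g','l','u','c','o','s','a','m','i','n','e'] ['G','l','c','N','A','c'] (rep ['M','a','n','n','o','s','e'] ['M','a','n'] (rep ['G','a','l','a','c','t','o','s','e'] ['G','a','l'] (rep ['G','l','u','c','o','s','e'] ['G','l','c'] t))))) = true :=
      cons_pref_transfer 'N' c ['-','a','c','e','t','y','l','g','a','l','a','c','t','o','s','a','m','i','n','e'] t _ (fun hx => rep_prefix_back 'G' 'G' ['l','u','c','o','s','e'] ['l','c'] t ['-','a','c','e','t','y','l','g','a','l','a','c','t','o','s','a','m','i','n','e'] (by simp) (by simp) (rep_prefix_back 'G' 'G' ['a','l','a','c','t','o','s','e'] ['a','l'] (rep ['G','l','u','c','o','s','e'] ['G','l','c'] t) ['-','a','c','e','t','y','l','g','a','l','a','c','t','o','s','a','m','i','n','e'] (by simp) (by simp) (rep_prefix_back 'M' 'M' ['a','n','n','o','s','e'] ['a','n'] (rep ['G','a','l','a','c','t','o','s','e'] ['G','a','l'] (rep ['G','l','u','c','o','s','e']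 ['G','l','c'] t)) ['-','a','c','e','t','y','l','g','a','l','a','c','t','o','s','a','m','i','n','e'] (by simp) (by simp) (rep_prefix_back 'N' 'G' ['-','a','c','e','t','y','l','g','l','u','c','o','s','a','m','i','n','e'] ['l','c','N','A','c'] (rep ['M','a','n','n','o','s','e'] ['M','a','n'] (rep ['G','a','l','a','c','t','o','s','e'] ['G','a','l'] (rep ['G','l','u','c','o','s','e'] ['G','l','c'] t))) ['-','a','c','e','t','y','l','g','a','l','a','c','t','o','s','a','m','i','n','e'] (by simp) (by simp) (hx))))) h5
    have e5 : rep ['N','-','a','c','e','t','y','l','g','a','l','a','c','t','o','s','a','m','i','n','e'] ['G','a','l','N','A','c'] (c :: (rep ['N','-','a','c','e','t','y','l','g','l','u','c','o','s','a','m','i','n','e'] ['G','l','c','N','A','c'] (rep ['M','a','n','n','o','s','e'] ['M','a','n'] (rep ['G','a','l','a','c','t','o','s','e'] ['G','a','l'] (rep ['G','l','u','c','o','s','e'] ['G','l','c'] t))))) = c :: (rep ['N','-','a','c','e','t','y','l','g','a','l','a','c','t','o','s','a','m','i','n','e'] ['G','a','l','N','A','c'] (rep ['N','-','a','c','e','t','y','l','g','l','u','c','o','s','a','m','i','n','e']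 ['G','l','c','N','A','c'] (rep ['M','a','n','n','o','s','e'] ['M','a','n'] (rep ['G','a','l','a','c','t','o','s','e'] ['G','a','l'] (rep ['G','l','u','c','o','s','e'] ['G','l','c'] t))))) := by rw [rep, if_neg n5]
    rw [e1, e2, e3, e4, e5, ih]

-- ===== VERDICT (by name: the statement is the Claim_ definition above) =====
theorem normalize_iupac_spec : Claim_equal_normalize_iupac := by
  intro iupac _
  unfold Spec_normalize_iupac normalize_iupac normalize_iupac_alt
  by_cases h : iupac.isEmpty
  · rw [if_pos h]
    have he : iupac = "" := by simpa using h
    subst he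
    refine String.toList_inj.mp ?_
    simp [nrmScan]
  · rw [if_neg h]
    refine String.toList_inj.mp ?_
    simp only [List.foldl, PySem.Str.toList_replace]
    rw [replace_eq_rep _ _ _ (by simp), replace_eq_rep _ _ _ (by simp),
        replace_eq_rep _ _ _ (by simp), replace_eq_rep _ _ _ (by simp),
        replace_eq_rep _ _ _ (by simp)]
    simpa using repAll_eq_scan iupac.toList
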